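-- pv_equiv track=rewrite | github.com/ChoiYoo/Practice | ZB/3차/3차_2번.py | solution
-- ===== SOURCE A (Python) =====
-- def solution(delay, N):
--     n_list = [1]
--     hap = 0
--     a = 1
--     b = 1 + delay
--     if delay == 0:
--         for f in range(N+1):
--             hap += 2**f
--     for _ in range(delay + 1):
--         n_list.append(2)
--     for d in range(delay-1):
--         n_list.append(2 * (d+2))
--     if N <= delay + 1:
--         hap = sum(n_list[0:N+1])
--     else:
--         for _ in range(N-(delay+1)):
--             next_num = sum(n_list[a:b+1])
--             a += 1
--             b += 1
--             n_list.append(next_num)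
--         hap = sum(n_list[0:N+1])
--     answer = hap
--     return answer
-- ===== SOURCE B (Python) =====
-- def solution(delay, N):
--     # same sequence as A; the sliding window sum is maintained
--     # incrementally (add incoming, subtract outgoing) instead of re-summing
--     # a (delay+1)-wide slice at every step.
--     seq = [1] + [2] * (delay + 1) + [2 * (j + 1) for j in range(1, delay)]
--     if N <= delay + 1:
--         return sum(seq[0:N + 1])
--     a = 1
--     w = sum(seq[1:delay + 2])
--     for _ in range(N - (delay + 1)):
--         seq.append(w)
--         w += seq[a + delay + 1] - seq[a]
--         a += 1
--     return sum(seq[0:N + 1])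
-- ===== Notes on version B (the rewrite author's own statement) =====
-- stated objective: alternative
-- what changed: B builds the same sequence but maintains the (delay+1)-wide window sum incrementally (add the incoming element, subtract the outgoing one) instead of re-summing a slice of delay+1 elements at every iteration, and drops A's dead power-of-two loop.
-- outside the precondition, e.g. on solution(-2, 2): A returns 1, B returns 2; on solution(-5, 4): A returns 1, B raises IndexError
import Mathlib
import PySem

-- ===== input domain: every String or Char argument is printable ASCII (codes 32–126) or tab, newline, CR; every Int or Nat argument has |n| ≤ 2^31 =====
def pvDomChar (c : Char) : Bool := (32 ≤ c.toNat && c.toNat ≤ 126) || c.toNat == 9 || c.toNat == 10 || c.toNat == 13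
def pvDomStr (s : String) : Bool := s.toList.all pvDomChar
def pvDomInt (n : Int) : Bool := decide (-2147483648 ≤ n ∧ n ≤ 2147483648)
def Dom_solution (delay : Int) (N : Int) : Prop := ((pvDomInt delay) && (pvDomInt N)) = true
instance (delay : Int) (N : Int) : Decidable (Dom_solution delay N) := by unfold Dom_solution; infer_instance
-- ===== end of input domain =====

-- B maintains the sliding-window sum incrementally (add incoming, subtract outgoing)
-- instead of re-summing a (delay+1)-wide slice each iteration (alternative algorithm).

-- ===== PORT A =====
def solution (delay : Int) (N : Int) : Int :=
  let n_list : List Int := [1]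
  let hap : Int := 0
  let a : Int := 1
  let b : Int := 1 + delay
  -- 2**f ported as 2 ^ f.toNat: exact since range(N+1) yields only f ≥ 0
  let hap : Int := if delay = 0 then
      (PySem.List.pyRange 0 (N + 1) 1).foldl (fun h f => h + 2 ^ f.toNat) hap
    else hap
  let n_list := (PySem.List.pyRange 0 (delay + 1) 1).foldl (fun l _ => l ++ [(2 : Int)]) n_list
  let n_list := (PySem.List.pyRange 0 (delay - 1) 1).foldl (fun l d => l ++ [2 * (d + 2)]) n_list
  let hap : Int := if N ≤ delay + 1 then
      (PySem.List.slice n_list (some 0) (some (N + 1))).sum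
    else
      let fin := (PySem.List.pyRange 0 (N - (delay + 1)) 1).foldl
        (fun (st : List Int × Int × Int) _ =>
          let next_num := (PySem.List.slice st.1 (some st.2.1) (some (st.2.2 + 1))).sum
          (st.1 ++ [next_num], st.2.1 + 1, st.2.2 + 1))
        (n_list, a, b)
      (PySem.List.slice fin.1 (some 0) (some (N + 1))).sum
  let answer := hap
  answer

-- ===== PORT B =====
def solution_alt (delay : Int) (N : Int) : Int :=
  let seq : List Int :=
    [1] ++ List.replicate (delay + 1).toNat 2
        ++ (PySem.List.pyRange 1 delay 1).map (fun j => 2 * (j + 1))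
  if N ≤ delay + 1 then
    (PySem.List.slice seq (some 0) (some (N + 1))).sum
  else
    let w : Int := (PySem.List.slice seq (some 1) (some (delay + 2))).sum
    let fin := (PySem.List.pyRange 0 (N - (delay + 1)) 1).foldl
      (fun (st : List Int × Int × Int) _ =>
        let seq' := st.1 ++ [st.2.2]
        (seq', st.2.1 + 1,
          st.2.2 + PySem.List.pyGetD seq' (st.2.1 + delay + 1) 0
                 - PySem.List.pyGetD seq' st.2.1 0))
      (seq, 1, w)
    (PySem.List.slice fin.1 (some 0) (some (N + 1))).sum

-- ===== PRECONDITION & SPEC =====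
-- Pre_ excludes delay ≤ -2 with N > delay+1 (outside the natural domain delay ≥ 0):
-- there A's returned value (always 0 or 1) is an artefact of window slices that are
-- empty because the window start already lies past the end of the one-element list,
-- and B's incremental indexing raises or yields another value.
def Pre_solution (delay : Int) (N : Int) : Prop := -1 ≤ delay ∨ N ≤ delay + 1
instance (delay : Int) (N : Int) : Decidable (Pre_solution delay N) := by
  unfold Pre_solution; infer_instance
def pvWitness_solution : Int × Int := (2, 5)
def Spec_solution (delay : Int) (N : Int) (out : Int) : Prop := out = solution_alt delay N
instance (delay : Int) (N : Int) (out : Int) : Decidable (Spec_solution delay N out) := by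
  unfold Spec_solution; infer_instance

-- ===== CLAIM (what is proved, stated in full; the proofs are below) =====
def Claim_equal_solution : Prop := ∀ (delay : Int) (N : Int), Dom_solution delay N → Pre_solution delay N → Spec_solution delay N (solution delay N)

-- ===== LEMMAS AND PROOFS =====

-- sum of the window slid one step right, inside m
theorem pv_window_slide (m : List Int) (i n : Nat) (h : i + n < m.length) :
    ((m.drop (i + 1)).take n).sum
      = ((m.drop i).take n).sum + m.getD (i + n) 0 - m.getD i 0 := by
  have hi : i < m.length := by omega
  have hdrop : m.drop i = m[i] :: m.drop (i + 1) := List.drop_eq_getElem_cons hi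
  have h1 : ((m.drop i).take (n + 1)).sum = m[i] + ((m.drop (i + 1)).take n).sum := by
    rw [hdrop, List.take_succ_cons, List.sum_cons]
  have h2 : ((m.drop i).take (n + 1)).sum = ((m.drop i).take n).sum + m[i + n] := by
    have : (m.drop i)[n]? = some m[i + n] := by
      rw [List.getElem?_drop]
      exact List.getElem?_eq_getElem (by omega)
    rw [List.take_add_one, this]; simp
  have g1 : m.getD (i + n) 0 = m[i + n] := List.getD_eq_getElem m 0 h
  have g2 : m.getD i 0 = m[i] := List.getD_eq_getElem m 0 hi
  rw [g1, g2]; omega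

-- the window sum of l at Int position a (used only by the proofs)
def pvWsum (delay : Int) (l : List Int) (a : Int) : Int :=
  (PySem.List.slice l (some a) (some (a + delay + 1))).sum

theorem pvWsum_eq (delay : Int) (hd : -1 ≤ delay) (l : List Int) (a : Int) (ha : 0 ≤ a) :
    pvWsum delay l a = ((l.drop a.toNat).take ((delay + 1).toNat)).sum := by
  unfold pvWsum
  rw [PySem.List.slice_toNat l ha (by omega),
      show (a + delay + 1).toNat - a.toNat = (delay + 1).toNat from by omega]

-- one sliding step of the incremental window sum
theorem pvWsum_step (delay : Int) (hd : -1 ≤ delay) (l : List Int) (x : Int) (a : Int)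
    (ha : 0 ≤ a) (hlen : a.toNat + (delay + 1).toNat ≤ l.length) :
    pvWsum delay (l ++ [x]) (a + 1)
      = pvWsum delay l a + PySem.List.pyGetD (l ++ [x]) (a + delay + 1) 0
        - PySem.List.pyGetD (l ++ [x]) a 0 := by
  have hidx : ((a + delay + 1).toNat) = a.toNat + (delay + 1).toNat := by omega
  have hgt : PySem.List.pyGetD (l ++ [x]) (a + delay + 1) 0
      = (l ++ [x]).getD (a.toNat + (delay + 1).toNat) 0 := by
    rw [PySem.List.pyGetD_eq_getElem (l ++ [x]) 0 (by omega) (by simp; omega)]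
    rw [List.getD_eq_getElem _ _ (by simp; omega)]
    simp only [hidx]
  have hga : PySem.List.pyGetD (l ++ [x]) a 0 = (l ++ [x]).getD a.toNat 0 := by
    rw [PySem.List.pyGetD_eq_getElem (l ++ [x]) 0 ha (by simp; omega)]
    rw [List.getD_eq_getElem _ _ (by simp; omega)]
  have hwl : pvWsum delay (l ++ [x]) (a + 1)
      = (((l ++ [x]).drop (a.toNat + 1)).take ((delay + 1).toNat)).sum := by
    rw [pvWsum_eq delay hd _ _ (by omega), show (a + 1).toNat = a.toNat + 1 from by omega]
  have hwr : pvWsum delay l a = (((l ++ [x]).drop a.toNat).take ((delay + 1).toNat)).sum := by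
    rw [pvWsum_eq delay hd _ _ ha]
    congr 1
    rw [List.drop_append_of_le_length (by omega), List.take_append_of_le_length (by simp; omega)]
  rw [hwl, hwr, hgt, hga]
  exact pv_window_slide (l ++ [x]) a.toNat ((delay + 1).toNat) (by simp; omega)

-- the two loops, run over any index list, stay in lockstep
theorem pv_loop (delay : Int) (hd : -1 ≤ delay) :
    ∀ (r : List Int) (l : List Int) (a : Int), 0 ≤ a →
      a.toNat + (delay + 1).toNat ≤ l.length →
      (r.foldl
        (fun (st : List Int × Int × Int) _ =>
          let seq' := st.1 ++ [st.2.2]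
          (seq', st.2.1 + 1,
            st.2.2 + PySem.List.pyGetD seq' (st.2.1 + delay + 1) 0
                   - PySem.List.pyGetD seq' st.2.1 0))
        (l, a, pvWsum delay l a)).1
      = (r.foldl
        (fun (st : List Int × Int × Int) _ =>
          let next_num := (PySem.List.slice st.1 (some st.2.1) (some (st.2.2 + 1))).sum
          (st.1 ++ [next_num], st.2.1 + 1, st.2.2 + 1))
        (l, a, a + delay)).1 := by
  intro r
  induction r with
  | nil => intro l a _ _; rfl
  | cons hd' tl ih =>
      intro l a ha hlen
      simp only [List.foldl_cons]
      have hnext : (PySem.List.slice l (some a) (some (a + delay + 1))).sum = pvWsum delay l a := rfl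
      have hstep := pvWsum_step delay hd l (pvWsum delay l a) a ha hlen
      rw [hnext, ← hstep, show a + delay + 1 = a + 1 + delay from by ring]
      exact ih (l ++ [pvWsum delay l a]) (a + 1) (by omega) (by simp; omega)

-- A's list-building loops produce B's literal initial list
theorem pv_append_const (c : Int) : ∀ (r : List Int) (init : List Int),
    r.foldl (fun l _ => l ++ [c]) init = init ++ List.replicate r.length c := by
  intro r
  induction r with
  | nil => intro init; simp
  | cons h t ih =>
      intro init
      rw [List.foldl_cons, ih, List.append_assoc]
      rfl

theorem pv_append_map (f : Int → Int) : ∀ (r : List Int) (init : List Int),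
    r.foldl (fun l d => l ++ [f d]) init = init ++ r.map f := by
  intro r
  induction r with
  | nil => intro init; simp
  | cons h t ih => intro init; simp [ih]

theorem pv_tail_eq (delay : Int) :
    (PySem.List.pyRange 0 (delay - 1) 1).map (fun d => 2 * (d + 2))
      = (PySem.List.pyRange 1 delay 1).map (fun j => 2 * (j + 1)) := by
  rw [PySem.List.pyRange_one, PySem.List.pyRange_one]
  simp only [List.map_map, Int.sub_zero]
  have hn : (delay - 1).toNat = (delay - 1).toNat := rfl
  apply List.map_congr_left
  intro k _
  simp only [Function.comp]
  ring

theorem pv_nlist_eq (delay : Int) :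
    (PySem.List.pyRange 0 (delay - 1) 1).foldl (fun l d => l ++ [2 * (d + 2)])
      ((PySem.List.pyRange 0 (delay + 1) 1).foldl (fun l _ => l ++ [(2 : Int)]) [1])
    = [1] ++ List.replicate (delay + 1).toNat 2
          ++ (PySem.List.pyRange 1 delay 1).map (fun j => 2 * (j + 1)) := by
  rw [pv_append_const, pv_append_map, pv_tail_eq, PySem.List.length_pyRange_one]
  simp

-- ===== VERDICT (by name: the statement is the Claim_ definition above) =====
theorem solution_spec : Claim_equal_solution := by
  intro delay N _ hpre
  unfold Spec_solution solution solution_alt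
  simp only [pv_nlist_eq]
  set seq : List Int := [1] ++ List.replicate (delay + 1).toNat 2
      ++ (PySem.List.pyRange 1 delay 1).map (fun j => 2 * (j + 1)) with hseq
  by_cases hN : N ≤ delay + 1
  · simp [hN]
  · simp only [hN, if_false]
    have hd : (-1 : Int) ≤ delay := by
      rcases hpre with h | h
      · exact h
      · exact absurd h hN
    have hlen : (1 : Int).toNat + (delay + 1).toNat ≤ seq.length := by
      rw [hseq]
      simp [PySem.List.length_pyRange_one]
      omega
    have hw : (PySem.List.slice seq (some 1) (some (delay + 2))).sum = pvWsum delay seq 1 := by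
      unfold pvWsum
      congr 3
      ring
    have hb : (1 : Int) + delay = 1 + delay := rfl
    have := pv_loop delay hd (PySem.List.pyRange 0 (N - (delay + 1)) 1) seq 1 (by norm_num) hlen
    rw [hw]
    have h1d : (1 : Int) + delay = (1 : Int) + delay := rfl
    -- align A's initial b = 1 + delay with the lemma's a + delay
    rw [show (1 : Int) + delay = (1 : Int) + delay from rfl] at this
    congr 1
    rw [this]
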